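-- pv_equiv track=rewrite | github.com/Maigard/2021AoC | 13/part2.py | make_paper
-- ===== SOURCE A (Python) =====
-- def make_paper(paper: "list") -> "list":
--     (maxx, maxy) = (0, 0)
--     for (x, y) in paper:
--         maxx = max(maxx, x)
--         maxy = max(maxy, y)
--     grid = [[False for x in range(maxx + 1)] for y in range(maxy + 1)]
--     for (x, y) in paper:
--         grid[y][x] = True
--     return grid
-- ===== SOURCE B (Python) =====
-- def make_paper(paper: "list") -> "list":
--     maxx = maxy = 0
--     for (x, y) in paper:
--         if x > maxx:
--             maxx = x
--         if y > maxy: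
--             maxy = y
--     # bucket the x-coordinates by row, then materialise each row from its bucket
--     buckets = [[] for _ in range(maxy + 1)]
--     for (x, y) in paper:
--         buckets[y].append(x)
--     out = []
--     for xs in buckets:
--         row = [False] * (maxx + 1)
--         for x in xs:
--             row[x] = True
--         out.append(row)
--     return out
-- ===== Notes on version B (the rewrite author's own statement) =====
-- stated objective: faster
-- what changed: A scatters every point into a pre-zeroed full 2D grid built cell by cell with a nested comprehension; B buckets the x-coordinates by row and then materialises each output row from its bucket, building each blank row with C-level list multiplication instead of a per-cell comprehension.
import Mathlib
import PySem

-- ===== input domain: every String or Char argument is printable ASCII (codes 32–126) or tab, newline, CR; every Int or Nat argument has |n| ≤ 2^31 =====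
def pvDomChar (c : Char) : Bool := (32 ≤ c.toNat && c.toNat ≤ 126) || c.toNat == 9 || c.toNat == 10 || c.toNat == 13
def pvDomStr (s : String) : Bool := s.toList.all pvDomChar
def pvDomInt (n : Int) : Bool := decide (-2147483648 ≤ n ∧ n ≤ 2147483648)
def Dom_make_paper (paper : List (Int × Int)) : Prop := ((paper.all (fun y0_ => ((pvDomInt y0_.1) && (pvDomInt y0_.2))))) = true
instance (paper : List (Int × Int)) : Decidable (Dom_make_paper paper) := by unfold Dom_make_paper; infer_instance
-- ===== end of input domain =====

-- B buckets the x-coordinates by row and then materialises each row from its bucket,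
-- instead of A's scatter of every point into a pre-zeroed full grid.

-- ===== PORT A =====
-- running maxima of A's first loop
def pvMaxXY (paper : List (Int × Int)) : Int × Int :=
  paper.foldl (fun m p => (max m.1 p.1, max m.2 p.2)) (0, 0)

-- grid[y][x] = True  (Python index semantics)
def pvScatter (grid : List (List Bool)) (p : Int × Int) : List (List Bool) :=
  PySem.List.pySetD grid p.2 (PySem.List.pySetD (PySem.List.pyGetD grid p.2 []) p.1 true)

def make_paper (paper : List (Int × Int)) : List (List Bool) :=
  let m := pvMaxXY paper
  let grid := (PySem.List.pyRange 0 (m.2 + 1) 1).map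
      (fun _ => (PySem.List.pyRange 0 (m.1 + 1) 1).map (fun _ => false))
  paper.foldl pvScatter grid

-- ===== PORT B =====
-- buckets[y].append(x)  (Python index semantics)
def pvBucketAdd (bs : List (List Int)) (p : Int × Int) : List (List Int) :=
  PySem.List.pySetD bs p.2 (PySem.List.pyGetD bs p.2 [] ++ [p.1])

-- row = [False] * w; for x in xs: row[x] = True
def pvFillRow (w : Nat) (xs : List Int) : List Bool :=
  xs.foldl (fun row x => PySem.List.pySetD row x true) (List.replicate w false)

def make_paper_alt (paper : List (Int × Int)) : List (List Bool) :=
  let m := paper.foldl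
      (fun (m : Int × Int) p =>
        (if p.1 > m.1 then p.1 else m.1, if p.2 > m.2 then p.2 else m.2)) (0, 0)
  let buckets0 := (PySem.List.pyRange 0 (m.2 + 1) 1).map (fun _ => ([] : List Int))
  let buckets := paper.foldl pvBucketAdd buckets0
  buckets.map (pvFillRow (m.1 + 1).toNat)

-- ===== PRECONDITION & SPEC =====
-- Pre_ excludes exactly the inputs on which A raises IndexError: a point whose negative
-- coordinate falls below the negative-index wrap range of the grid A allocates.
def Pre_make_paper (paper : List (Int × Int)) : Prop :=
  ∀ p ∈ paper, -((pvMaxXY paper).1 + 1) ≤ p.1 ∧ -((pvMaxXY paper).2 + 1) ≤ p.2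
instance (paper : List (Int × Int)) : Decidable (Pre_make_paper paper) := by
  unfold Pre_make_paper; infer_instance
def pvWitness_make_paper : (List (Int × Int)) := [(0, 0), (2, 1)]

def Spec_make_paper (paper : List (Int × Int)) (out : List (List Bool)) : Prop :=
  out = make_paper_alt paper
instance (paper : List (Int × Int)) (out : List (List Bool)) : Decidable (Spec_make_paper paper out) := by
  unfold Spec_make_paper; infer_instance

-- ===== CLAIM =====
def Claim_equal_make_paper : Prop :=
  ∀ (paper : List (Int × Int)), Dom_make_paper paper → Pre_make_paper paper →
    Spec_make_paper paper (make_paper paper)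

-- ===== LEMMAS AND PROOFS =====

-- the grid entry at row j, column i (out-of-range reads give false)
def pvEntry (g : List (List Bool)) (j i : Nat) : Bool := (g.getD j []).getD i false

lemma pvMax_aux (l : List (Int × Int)) (m0 : Int × Int) :
    m0.1 ≤ (l.foldl (fun m p => (max m.1 p.1, max m.2 p.2)) m0).1 ∧
    m0.2 ≤ (l.foldl (fun m p => (max m.1 p.1, max m.2 p.2)) m0).2 ∧
    ∀ p ∈ l, p.1 ≤ (l.foldl (fun m p => (max m.1 p.1, max m.2 p.2)) m0).1 ∧
             p.2 ≤ (l.foldl (fun m p => (max m.1 p.1, max m.2 p.2)) m0).2 := by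
  induction l generalizing m0 with
  | nil => simp
  | cons a l ih =>
    simp only [List.foldl_cons]
    obtain ⟨h1, h2, h3⟩ := ih (max m0.1 a.1, max m0.2 a.2)
    refine ⟨le_trans (le_max_left _ _) h1, le_trans (le_max_left _ _) h2, ?_⟩
    intro p hp
    rcases List.mem_cons.mp hp with rfl | hp
    · exact ⟨le_trans (le_max_right _ _) h1, le_trans (le_max_right _ _) h2⟩
    · exact h3 p hp

lemma pvMaxXY_bounds (paper : List (Int × Int)) :
    0 ≤ (pvMaxXY paper).1 ∧ 0 ≤ (pvMaxXY paper).2 ∧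
    ∀ p ∈ paper, p.1 ≤ (pvMaxXY paper).1 ∧ p.2 ≤ (pvMaxXY paper).2 := by
  have h := pvMax_aux paper (0, 0)
  exact ⟨h.1, h.2.1, h.2.2⟩

-- B's running-max loop computes the same maxima as A's
lemma alt_max_eq (paper : List (Int × Int)) :
    paper.foldl (fun (m : Int × Int) p =>
      (if p.1 > m.1 then p.1 else m.1, if p.2 > m.2 then p.2 else m.2)) (0, 0) = pvMaxXY paper := by
  unfold pvMaxXY
  congr 1
  funext m p
  refine Prod.ext ?_ ?_ <;> simp only [Int.max_def] <;> split_ifs <;> omega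

-- Python's index normalisation on an in-range (possibly negative) index is % by the length
lemma pyIdx?_inrange (n : Nat) (i : Int) (h1 : -(n:Int) ≤ i) (h2 : i < (n:Int)) :
    PySem.List.pyIdx? n i = some ((i % (n:Int)).toNat) := by
  unfold PySem.List.pyIdx?
  split_ifs with ha
  · rw [Int.emod_eq_of_lt ha h2]
  · have hmod : i % (n:Int) = i + n := by
      have h1' : (i + (n:Int) * 1) % (n:Int) = i % n := Int.add_mul_emod_self_left ..
      rw [mul_one] at h1'
      rw [← h1', Int.emod_eq_of_lt (by omega) (by omega)]
    rw [hmod]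
    congr 1
    omega

lemma pySetD_inrange {α : Type} (xs : List α) (i : Int) (v : α)
    (h1 : -(xs.length:Int) ≤ i) (h2 : i < (xs.length:Int)) :
    PySem.List.pySetD xs i v = xs.set ((i % (xs.length:Int)).toNat) v := by
  unfold PySem.List.pySetD PySem.List.pySet?
  rw [pyIdx?_inrange _ _ h1 h2]
  rfl

lemma pyGetD_inrange {α : Type} (xs : List α) (i : Int) (d : α)
    (h1 : -(xs.length:Int) ≤ i) (h2 : i < (xs.length:Int)) :
    PySem.List.pyGetD xs i d = xs.getD ((i % (xs.length:Int)).toNat) d := by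
  unfold PySem.List.pyGetD PySem.List.pyGet?
  rw [pyIdx?_inrange _ _ h1 h2]
  simp [List.getD_eq_getElem?_getD]

lemma getD_set_eq {α : Type} (l : List α) (n j : Nat) (a d : α) :
    (l.set n a).getD j d = if j = n ∧ n < l.length then a else l.getD j d := by
  simp only [List.getD_eq_getElem?_getD, List.getElem?_set]
  split_ifs with h1 h2 h3 h4 <;> simp_all

lemma scatter_step (grid : List (List Bool)) (p : Int × Int) (W : Nat)
    (hrow : ∀ r ∈ grid, r.length = W)
    (h1 : -(W:Int) ≤ p.1) (h2 : p.1 < (W : Int))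
    (h3 : -(grid.length:Int) ≤ p.2) (h4 : p.2 < (grid.length : Int)) :
    (pvScatter grid p).length = grid.length ∧
    (∀ r ∈ pvScatter grid p, r.length = W) ∧
    ∀ j i : Nat, pvEntry (pvScatter grid p) j i =
      (pvEntry grid j i ||
        (decide (j = (p.2 % (grid.length:Int)).toNat) && decide (i = (p.1 % (W:Int)).toNat))) := by
  have hlen0 : 0 < grid.length := by omega
  have hW0 : 0 < W := by omega
  have hmodn0 : 0 ≤ p.2 % (grid.length:Int) := Int.emod_nonneg _ (by omega)
  have hmodn1 : p.2 % (grid.length:Int) < grid.length := Int.emod_lt_of_pos _ (by omega)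
  have hmodm0 : 0 ≤ p.1 % (W:Int) := Int.emod_nonneg _ (by omega)
  have hmodm1 : p.1 % (W:Int) < W := Int.emod_lt_of_pos _ (by omega)
  have hn : (p.2 % (grid.length:Int)).toNat < grid.length := by omega
  have hm : (p.1 % (W:Int)).toNat < W := by omega
  have hgetrow : PySem.List.pyGetD grid p.2 [] = grid[(p.2 % (grid.length:Int)).toNat]'hn := by
    rw [pyGetD_inrange _ _ _ h3 h4, List.getD_eq_getElem _ _ hn]
  have hWrow : (grid[(p.2 % (grid.length:Int)).toNat]'hn).length = W :=
    hrow _ (List.getElem_mem hn)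
  have hinner : PySem.List.pySetD (grid[(p.2 % (grid.length:Int)).toNat]'hn) p.1 true
      = (grid[(p.2 % (grid.length:Int)).toNat]'hn).set ((p.1 % (W:Int)).toNat) true := by
    rw [pySetD_inrange _ _ _ (by rw [hWrow]; exact h1) (by rw [hWrow]; exact h2), hWrow]
  have heq : pvScatter grid p
      = grid.set (p.2 % (grid.length:Int)).toNat
          ((grid[(p.2 % (grid.length:Int)).toNat]'hn).set (p.1 % (W:Int)).toNat true) := by
    unfold pvScatter
    rw [hgetrow, hinner, pySetD_inrange _ _ _ h3 h4]
  rw [heq]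
  refine ⟨by simp, ?_, ?_⟩
  · intro r hr
    rcases List.mem_or_eq_of_mem_set hr with hr | rfl
    · exact hrow r hr
    · simp [hWrow]
  · intro j i
    unfold pvEntry
    rw [getD_set_eq]
    by_cases hj : j = (p.2 % (grid.length:Int)).toNat
    · subst hj
      simp only [hn, and_true, if_true, decide_true, Bool.true_and, List.getD_eq_getElem?_getD,
        List.getElem?_eq_getElem hn]
      rw [Option.getD_some, List.getElem?_set]
      by_cases hi : i = (p.1 % (W:Int)).toNat
      · simp [hi, hWrow, hm]
      · simp [Ne.symm hi, hi]
    · simp [hj]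

-- characterisation of A's scatter loop
lemma scatter_fold_char (ps : List (Int × Int)) (grid : List (List Bool)) (W : Nat)
    (hrow : ∀ r ∈ grid, r.length = W)
    (hp : ∀ p ∈ ps, -(W:Int) ≤ p.1 ∧ p.1 < (W : Int) ∧
          -(grid.length:Int) ≤ p.2 ∧ p.2 < (grid.length : Int)) :
    (ps.foldl pvScatter grid).length = grid.length ∧
    (∀ r ∈ ps.foldl pvScatter grid, r.length = W) ∧
    ∀ j i : Nat, pvEntry (ps.foldl pvScatter grid) j i =
      (pvEntry grid j i || ps.any (fun p =>
        decide (j = (p.2 % (grid.length:Int)).toNat) && decide (i = (p.1 % (W:Int)).toNat))) := by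
  induction ps generalizing grid with
  | nil => exact ⟨rfl, hrow, by simp⟩
  | cons p ps ih =>
    obtain ⟨h1, h2, h3, h4⟩ := hp p (List.mem_cons_self ..)
    obtain ⟨hl, hr, he⟩ := scatter_step grid p W hrow h1 h2 h3 h4
    obtain ⟨hl', hr', he'⟩ := ih (pvScatter grid p) hr
      (fun q hq => by have := hp q (List.mem_cons_of_mem _ hq); rw [hl]; exact this)
    simp only [hl] at he'
    simp only [List.foldl_cons]
    refine ⟨by rw [hl', hl], hr', ?_⟩
    intro j i
    rw [he' j i, he j i, List.any_cons, Bool.or_assoc]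

-- ---- B-side lemmas ----

-- one bucket insertion appends p.1 to bucket (p.2 mod length)
lemma bucket_step (bs : List (List Int)) (p : Int × Int)
    (h1 : -(bs.length:Int) ≤ p.2) (h2 : p.2 < (bs.length:Int)) :
    (pvBucketAdd bs p).length = bs.length ∧
    ∀ j : Nat, (pvBucketAdd bs p).getD j [] =
      bs.getD j [] ++ (if (p.2 % (bs.length:Int)).toNat = j then [p.1] else []) := by
  have hlen0 : 0 < bs.length := by omega
  have hmod0 : 0 ≤ p.2 % (bs.length:Int) := Int.emod_nonneg _ (by omega)
  have hmod1 : p.2 % (bs.length:Int) < bs.length := Int.emod_lt_of_pos _ (by omega)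
  have hn : (p.2 % (bs.length:Int)).toNat < bs.length := by omega
  have heq : pvBucketAdd bs p
      = bs.set (p.2 % (bs.length:Int)).toNat
          (bs.getD (p.2 % (bs.length:Int)).toNat [] ++ [p.1]) := by
    unfold pvBucketAdd
    rw [pyGetD_inrange _ _ _ h1 h2, pySetD_inrange _ _ _ h1 h2]
  rw [heq]
  refine ⟨by simp, ?_⟩
  intro j
  rw [getD_set_eq]
  by_cases hj : (p.2 % (bs.length:Int)).toNat = j
  · rw [if_pos hj, if_pos ⟨hj.symm, hn⟩, hj]
  · rw [if_neg hj, if_neg (by intro h; exact hj h.1.symm), List.append_nil]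

-- the bucket fold distributes every point's x into bucket (y mod height), in order
lemma bucket_fold_char (ps : List (Int × Int)) (bs : List (List Int))
    (hp : ∀ p ∈ ps, -(bs.length:Int) ≤ p.2 ∧ p.2 < (bs.length:Int)) :
    (ps.foldl pvBucketAdd bs).length = bs.length ∧
    ∀ j : Nat, (ps.foldl pvBucketAdd bs).getD j [] =
      bs.getD j [] ++ (ps.filter (fun p => decide ((p.2 % (bs.length:Int)).toNat = j))).map Prod.fst := by
  induction ps generalizing bs with
  | nil => exact ⟨rfl, by simp⟩
  | cons p ps ih =>
    obtain ⟨h1, h2⟩ := hp p (List.mem_cons_self ..)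
    obtain ⟨hl, he⟩ := bucket_step bs p h1 h2
    obtain ⟨hl', he'⟩ := ih (pvBucketAdd bs p)
      (fun q hq => by have := hp q (List.mem_cons_of_mem _ hq); rw [hl]; exact this)
    simp only [hl] at he'
    simp only [List.foldl_cons]
    refine ⟨by rw [hl', hl], ?_⟩
    intro j
    rw [he' j, he j, List.filter_cons, List.append_assoc]
    by_cases hj : (p.2 % (bs.length:Int)).toNat = j
    · simp [hj]
    · simp [hj]

-- filling a row sets exactly the wrapped x positions
lemma fill_row_char (xs : List Int) (row : List Bool)
    (hx : ∀ x ∈ xs, -(row.length:Int) ≤ x ∧ x < (row.length:Int)) :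
    (xs.foldl (fun row x => PySem.List.pySetD row x true) row).length = row.length ∧
    ∀ i : Nat, (xs.foldl (fun row x => PySem.List.pySetD row x true) row).getD i false =
      (row.getD i false || xs.any (fun x => decide (i = (x % (row.length:Int)).toNat))) := by
  induction xs generalizing row with
  | nil => exact ⟨rfl, by simp⟩
  | cons x xs ih =>
    obtain ⟨h1, h2⟩ := hx x (List.mem_cons_self ..)
    have hlen0 : 0 < row.length := by omega
    have hmod0 : 0 ≤ x % (row.length:Int) := Int.emod_nonneg _ (by omega)
    have hmod1 : x % (row.length:Int) < row.length := Int.emod_lt_of_pos _ (by omega)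
    have hn : (x % (row.length:Int)).toNat < row.length := by omega
    have hstep : PySem.List.pySetD row x true = row.set (x % (row.length:Int)).toNat true :=
      pySetD_inrange _ _ _ h1 h2
    have hslen : (row.set (x % (row.length:Int)).toNat true).length = row.length := by simp
    obtain ⟨hl, he⟩ := ih (row.set (x % (row.length:Int)).toNat true)
      (fun z hz => by have := hx z (List.mem_cons_of_mem _ hz); rw [hslen]; exact this)
    simp only [hslen] at hl he
    simp only [List.foldl_cons, hstep]
    refine ⟨hl, ?_⟩
    intro i
    rw [he i, getD_set_eq, List.any_cons]
    by_cases hi : i = (x % (row.length:Int)).toNat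
    · simp [hi, hn]
    · rw [if_neg (by intro h; exact hi h.1)]
      simp [hi]

-- membership in a filtered-and-projected bucket comes from a point of the list
lemma mem_bucket (ps : List (Int × Int)) (q : Int × Int → Bool) (x : Int)
    (hx : x ∈ (ps.filter q).map Prod.fst) : ∃ p ∈ ps, p.1 = x := by
  obtain ⟨p, hp, rfl⟩ := List.mem_map.mp hx
  exact ⟨p, (List.mem_filter.mp hp).1, rfl⟩

-- A = B on every input admitted by Pre_
lemma make_paper_eq_alt (paper : List (Int × Int)) (hpre : Pre_make_paper paper) :
    make_paper paper = make_paper_alt paper := by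
  obtain ⟨hx0, hy0, hmax⟩ := pvMaxXY_bounds paper
  unfold Pre_make_paper at hpre
  unfold make_paper make_paper_alt
  rw [alt_max_eq]
  simp only []
  set M := pvMaxXY paper with hM
  -- A side
  set row0 : List Bool := (PySem.List.pyRange 0 (M.1 + 1) 1).map (fun _ => false) with hrow0
  set grid0 : List (List Bool) :=
    (PySem.List.pyRange 0 (M.2 + 1) 1).map (fun _ => row0) with hgrid0
  have hrow0len : row0.length = (M.1 + 1).toNat := by
    simp [hrow0, PySem.List.length_pyRange_one]
  have hgrid0len : grid0.length = (M.2 + 1).toNat := by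
    simp [hgrid0, PySem.List.length_pyRange_one]
  have hrows : ∀ r ∈ grid0, r.length = (M.1 + 1).toNat := by
    intro r hr
    obtain ⟨_, _, rfl⟩ := List.mem_map.mp hr
    exact hrow0len
  have hentry0 : ∀ j i, pvEntry grid0 j i = false := by
    intro j i
    unfold pvEntry
    by_cases hj : j < grid0.length
    · rw [List.getD_eq_getElem _ _ hj]
      have : grid0[j] ∈ grid0 := List.getElem_mem hj
      obtain ⟨_, _, hg⟩ := List.mem_map.mp this
      rw [← hg]
      by_cases hi : i < row0.length
      · rw [List.getD_eq_getElem _ _ hi]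
        simp [hrow0]
      · rw [List.getD_eq_default _ _ (by omega)]
    · rw [show grid0.getD j [] = [] from List.getD_eq_default _ _ (by omega)]
      simp
  obtain ⟨hAlen, hArow, hAentry⟩ := scatter_fold_char paper grid0 (M.1 + 1).toNat hrows
    (by
      intro p hp
      obtain ⟨hb1, hb2⟩ := hmax p hp
      obtain ⟨hc1, hc2⟩ := hpre p hp
      rw [hgrid0len]
      refine ⟨by omega, by omega, by omega, by omega⟩)
  -- B side
  set bs0 : List (List Int) := (PySem.List.pyRange 0 (M.2 + 1) 1).map (fun _ => ([] : List Int))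
    with hbs0
  have hbs0len : bs0.length = (M.2 + 1).toNat := by
    simp [hbs0, PySem.List.length_pyRange_one]
  have hbs0getD : ∀ j, bs0.getD j [] = ([] : List Int) := by
    intro j
    by_cases hj : j < bs0.length
    · rw [List.getD_eq_getElem _ _ hj]
      have : bs0[j] ∈ bs0 := List.getElem_mem hj
      obtain ⟨_, _, hg⟩ := List.mem_map.mp this
      exact hg.symm
    · exact List.getD_eq_default _ _ (by omega)
  obtain ⟨hBlen, hBgetD⟩ := bucket_fold_char paper bs0
    (by
      intro p hp
      obtain ⟨hb1, hb2⟩ := hmax p hp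
      obtain ⟨hc1, hc2⟩ := hpre p hp
      rw [hbs0len]
      exact ⟨by omega, by omega⟩)
  set bsF := paper.foldl pvBucketAdd bs0 with hbsF
  have hW : (((M.1 + 1).toNat : Nat) : Int) = M.1 + 1 := by omega
  have hbound : ∀ (j : Nat) (x : Int), x ∈ bsF.getD j [] →
      -(((M.1 + 1).toNat : Nat):Int) ≤ x ∧ x < (((M.1 + 1).toNat : Nat):Int) := by
    intro j x hx
    rw [hBgetD j, hbs0getD, List.nil_append] at hx
    obtain ⟨p, hp, rfl⟩ := mem_bucket _ _ _ hx
    obtain ⟨hb1, hb2⟩ := hmax p hp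
    obtain ⟨hc1, hc2⟩ := hpre p hp
    rw [hW]
    exact ⟨by omega, by omega⟩
  have hfill : ∀ j : Nat, (pvFillRow (M.1 + 1).toNat (bsF.getD j [])).length = (M.1 + 1).toNat ∧
      ∀ i : Nat, (pvFillRow (M.1 + 1).toNat (bsF.getD j [])).getD i false =
        (bsF.getD j []).any (fun x => decide (i = (x % (M.1 + 1)).toNat)) := by
    intro j
    have hrl : (List.replicate (M.1 + 1).toNat false).length = (M.1 + 1).toNat := by simp
    obtain ⟨hl, he⟩ := fill_row_char (bsF.getD j []) (List.replicate (M.1 + 1).toNat false)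
      (by rw [hrl]; exact hbound j)
    rw [hrl] at hl he
    refine ⟨hl, fun i => ?_⟩
    rw [show pvFillRow (M.1 + 1).toNat (bsF.getD j []) =
        (bsF.getD j []).foldl (fun row x => PySem.List.pySetD row x true)
          (List.replicate (M.1 + 1).toNat false) from rfl, he i]
    rw [List.getD_eq_getElem?_getD, List.getElem?_replicate]
    rw [hW]
    split <;> rfl
  apply List.ext_getElem
  · simp only [hAlen, List.length_map]
    rw [hgrid0len, hBlen, hbs0len]
  · intro j hj1 hj2
    have hjB : j < bsF.length := by simpa using hj2
    apply List.ext_getElem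
    · rw [hArow _ (List.getElem_mem hj1)]
      simp only [List.getElem_map]
      rw [show bsF[j]'hjB = bsF.getD j [] from (List.getD_eq_getElem _ _ hjB).symm,
        (hfill j).1]
    · intro i hi1 hi2
      have eA : ((paper.foldl pvScatter grid0)[j]'hj1)[i]'hi1 =
          pvEntry (paper.foldl pvScatter grid0) j i := by
        unfold pvEntry
        rw [List.getD_eq_getElem _ _ hj1, List.getD_eq_getElem _ _ hi1]
      have eB : ((bsF.map (pvFillRow (M.1 + 1).toNat))[j]'hj2)[i]'hi2 =
          ((bsF.map (pvFillRow (M.1 + 1).toNat)).getD j []).getD i false := by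
        rw [List.getD_eq_getElem _ _ hj2, List.getD_eq_getElem _ _ hi2]
      have eB2 : ((bsF.map (pvFillRow (M.1 + 1).toNat)).getD j []).getD i false =
          (pvFillRow (M.1 + 1).toNat (bsF.getD j [])).getD i false := by
        have hjm : j < (bsF.map (pvFillRow (M.1 + 1).toNat)).length := hj2
        rw [List.getD_eq_getElem _ _ hjm, List.getElem_map,
          List.getD_eq_getElem _ _ hjB]
      rw [eA, eB, eB2, (hfill j).2 i, hAentry j i, hentry0, Bool.false_or,
        hBgetD j, hbs0getD, List.nil_append, List.any_map, List.any_filter]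
      rw [Bool.eq_iff_iff]
      simp only [List.any_eq_true, Bool.and_eq_true, decide_eq_true_eq, Function.comp]
      have hcast : ((grid0.length : Nat) : Int) = M.2 + 1 := by rw [hgrid0len]; omega
      have hcastB : ((bs0.length : Nat) : Int) = M.2 + 1 := by rw [hbs0len]; omega
      constructor
      · rintro ⟨p, hp, h1, h2⟩
        rw [hcast] at h1
        rw [hW] at h2
        exact ⟨p, hp, by rw [hcastB]; exact h1.symm, h2⟩
      · rintro ⟨p, hp, h1, h2⟩
        rw [hcastB] at h1
        exact ⟨p, hp, by rw [hcast]; exact h1.symm, by rw [hW]; exact h2⟩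

-- ===== VERDICT =====
theorem make_paper_spec : Claim_equal_make_paper := by
  intro paper _ hpre
  exact make_paper_eq_alt paper hpre
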